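-- pv_equiv track=rewrite | github.com/mirage-project/mirage | tests/runtime_python/blackwell/sm100_linear_nvfp4/profile/profile_quantize_nvfp4_sm100.py | locate_scale_mismatch
-- ===== SOURCE A (Python) =====
-- GROUP_SIZE = 16
--
-- def interleaved_nvfp4_scale_offset(
--     row_idx: int, group_idx: int, num_k_outer: int, scale_outer_stride: int = 32 * 4 * 4
-- ) -> int:
--     row_in_block = row_idx & 127
--     return (
--         (row_idx >> 7) * num_k_outer * scale_outer_stride
--         + (group_idx >> 2) * scale_outer_stride
--         + (row_in_block & 31) * 16
--         + ((row_in_block >> 5) & 3) * 4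
--         + (group_idx & 3)
--     )
--
-- def locate_scale_mismatch(flat_idx: int, rows: int, hidden: int) -> tuple[int, int] | None:
--     padded_rows = ((rows + 127) // 128) * 128
--     num_groups = hidden // GROUP_SIZE
--     num_k_outer = num_groups // 4
--     for row_idx in range(padded_rows):
--         for group_idx in range(num_groups):
--             if (
--                 interleaved_nvfp4_scale_offset(row_idx, group_idx, num_k_outer)
--                 == flat_idx
--             ):
--                 return row_idx, group_idx
--     return None
-- ===== SOURCE B (Python) =====
-- GROUP_SIZE = 16
--
-- def locate_scale_mismatch(flat_idx: int, rows: int, hidden: int):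
--     # Invert the interleaved-offset formula in O(1) instead of scanning all pairs.
--     padded_rows = ((rows + 127) // 128) * 128
--     num_groups = hidden // GROUP_SIZE
--     nblocks = padded_rows // 128
--     num_k_outer = num_groups // 4
--     if num_groups <= 0 or nblocks <= 0:
--         return None
--     q, low = divmod(flat_idx, 512)
--     r5 = low // 16
--     r2 = (low // 4) % 4
--     g3 = low % 4
--     gmax = (num_groups - 1 - g3) // 4  # largest group_idx>>2 compatible with g3
--     if gmax < 0:
--         return None
--     if num_k_outer == 0:
--         rb, gh = 0, q
--     else:
--         rb = max(0, -((gmax - q) // num_k_outer))  # smallest row block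
--         gh = q - rb * num_k_outer
--     if 0 <= gh <= gmax and rb < nblocks:
--         return 128 * rb + 32 * r2 + r5, 4 * gh + g3
--     return None
-- ===== Notes on version B (the rewrite author's own statement) =====
-- stated objective: faster
-- what changed: Replaces the exhaustive nested scan over all (row, group) pairs by a direct O(1) algebraic inversion of the interleaved scale-offset formula (decompose flat_idx by divmod 512, recover the low bit fields, solve rb*num_k_outer+gh=q for the smallest row block) followed by range checks.
import Mathlib
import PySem

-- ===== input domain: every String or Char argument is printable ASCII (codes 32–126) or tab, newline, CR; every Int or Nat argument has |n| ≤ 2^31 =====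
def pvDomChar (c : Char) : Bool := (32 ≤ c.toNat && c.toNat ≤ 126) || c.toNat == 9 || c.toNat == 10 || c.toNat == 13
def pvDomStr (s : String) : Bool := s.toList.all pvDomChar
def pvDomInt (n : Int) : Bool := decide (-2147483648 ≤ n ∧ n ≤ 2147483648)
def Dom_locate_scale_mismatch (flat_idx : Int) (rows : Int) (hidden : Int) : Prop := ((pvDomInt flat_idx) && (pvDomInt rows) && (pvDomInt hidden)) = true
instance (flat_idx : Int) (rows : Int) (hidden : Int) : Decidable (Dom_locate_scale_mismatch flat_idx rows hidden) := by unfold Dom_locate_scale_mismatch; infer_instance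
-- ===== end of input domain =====

-- B replaces A's exhaustive scan over all (row, group) pairs by an O(1) algebraic
-- inversion of the interleaved scale-offset formula (objective: faster, asymptotic).


-- ===== PORT A =====
-- helper: interleaved_nvfp4_scale_offset (scale_outer_stride kept as an explicit parameter; default 32*4*4 = 512)
def interleavedOffset (row_idx group_idx num_k_outer scale_outer_stride : Int) : Int :=
  let row_in_block := PySem.Int.band row_idx 127
  (row_idx >>> (7:Nat)) * num_k_outer * scale_outer_stride
    + (group_idx >>> (2:Nat)) * scale_outer_stride
    + (PySem.Int.band row_in_block 31) * 16
    + (PySem.Int.band (row_in_block >>> (5:Nat)) 3) * 4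
    + PySem.Int.band group_idx 3

-- inner for-loop over group_idx with early return
def locAInner (flat_idx num_k_outer row_idx : Int) : List Int → Option (Int × Int)
  | [] => none
  | g :: gs =>
      if interleavedOffset row_idx g num_k_outer (32*4*4) = flat_idx then some (row_idx, g)
      else locAInner flat_idx num_k_outer row_idx gs

-- outer for-loop over row_idx with early return
def locAOuter (flat_idx num_k_outer num_groups : Int) : List Int → Option (Int × Int)
  | [] => none
  | r :: rs =>
      match locAInner flat_idx num_k_outer r (PySem.List.pyRange 0 num_groups 1) with
      | some p => some p
      | none => locAOuter flat_idx num_k_outer num_groups rs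

def locate_scale_mismatch (flat_idx : Int) (rows : Int) (hidden : Int) : Option (Int × Int) :=
  let padded_rows := PySem.Int.floordiv (rows + 127) 128 * 128
  let num_groups := PySem.Int.floordiv hidden 16
  let num_k_outer := PySem.Int.floordiv num_groups 4
  locAOuter flat_idx num_k_outer num_groups (PySem.List.pyRange 0 padded_rows 1)

-- ===== PORT B =====
def locate_scale_mismatch_alt (flat_idx : Int) (rows : Int) (hidden : Int) : Option (Int × Int) :=
  let padded_rows := PySem.Int.floordiv (rows + 127) 128 * 128
  let num_groups := PySem.Int.floordiv hidden 16
  let nblocks := PySem.Int.floordiv padded_rows 128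
  let num_k_outer := PySem.Int.floordiv num_groups 4
  if num_groups ≤ 0 ∨ nblocks ≤ 0 then none
  else
    let q := PySem.Int.floordiv flat_idx 512
    let low := PySem.Int.mod flat_idx 512
    let r5 := PySem.Int.floordiv low 16
    let r2 := PySem.Int.mod (PySem.Int.floordiv low 4) 4
    let g3 := PySem.Int.mod low 4
    let gmax := PySem.Int.floordiv (num_groups - 1 - g3) 4
    if gmax < 0 then none
    else
      let p : Int × Int :=
        if num_k_outer = 0 then (0, q)
        else
          let rb := max 0 (-(PySem.Int.floordiv (gmax - q) num_k_outer))
          (rb, q - rb * num_k_outer)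
      if 0 ≤ p.2 ∧ p.2 ≤ gmax ∧ p.1 < nblocks then
        some (128 * p.1 + 32 * r2 + r5, 4 * p.2 + g3)
      else none

-- ===== PRECONDITION & SPEC =====
def Spec_locate_scale_mismatch (flat_idx : Int) (rows : Int) (hidden : Int) (out : Option (Int × Int)) : Prop := out = locate_scale_mismatch_alt flat_idx rows hidden
instance (flat_idx : Int) (rows : Int) (hidden : Int) (out : Option (Int × Int)) : Decidable (Spec_locate_scale_mismatch flat_idx rows hidden out) := by unfold Spec_locate_scale_mismatch; infer_instance

-- ===== CLAIM (what is proved, stated in full; the proofs are below) =====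
def Claim_equal_locate_scale_mismatch : Prop := ∀ (flat_idx : Int) (rows : Int) (hidden : Int), Dom_locate_scale_mismatch flat_idx rows hidden → Spec_locate_scale_mismatch flat_idx rows hidden (locate_scale_mismatch flat_idx rows hidden)

-- ===== LEMMAS AND PROOFS =====

-- bit-op bridges (all loop variables are nonnegative)
theorem pv_shr_nat (m : Nat) (k : Nat) : ((m:Int) >>> k) = ((m / 2 ^ k : Nat) : Int) := by
  simp [Int.shiftRight_eq_div_pow]

theorem pv_band127 (m : Nat) : PySem.Int.band (m:Int) 127 = ((m % 128 : Nat) : Int) := by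
  have := PySem.Int.band_natCast m 127
  norm_num at this
  rw [this, Nat.and_two_pow_sub_one_eq_mod m 7]

theorem pv_band31 (m : Nat) : PySem.Int.band (m:Int) 31 = ((m % 32 : Nat) : Int) := by
  have := PySem.Int.band_natCast m 31
  norm_num at this
  rw [this, Nat.and_two_pow_sub_one_eq_mod m 5]

theorem pv_band3 (m : Nat) : PySem.Int.band (m:Int) 3 = ((m % 4 : Nat) : Int) := by
  have := PySem.Int.band_natCast m 3
  norm_num at this
  rw [this, Nat.and_two_pow_sub_one_eq_mod m 2]

-- offset decomposition for nonnegative row/group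
theorem offset_decomp (r g nko : Int) (hr : 0 ≤ r) (hg : 0 ≤ g) :
    interleavedOffset r g nko (32*4*4) =
      512 * ((r / 128) * nko + g / 4) + (16 * (r % 32) + 4 * (r % 128 / 32) + g % 4) := by
  lift r to Nat using hr
  lift g to Nat using hg
  unfold interleavedOffset
  simp only [pv_band127, pv_band31, pv_band3, pv_shr_nat]
  push_cast
  norm_num
  generalize hY : (r:Int) / 128 * nko = Y
  omega

-- match characterization: off r g = flat ⟺ the four field equations
theorem offset_match (r g nko flat : Int) (hr : 0 ≤ r) (hg : 0 ≤ g) :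
    interleavedOffset r g nko (32*4*4) = flat ↔
      ((r / 128) * nko + g / 4 = flat / 512 ∧ r % 32 = flat % 512 / 16 ∧
        r % 128 / 32 = flat % 512 / 4 % 4 ∧ g % 4 = flat % 512 % 4) := by
  rw [offset_decomp r g nko hr hg]
  generalize (r / 128) * nko = Y
  omega

-- inner loop: no match over [a, ng)
theorem inner_none (flat nko r : Int) (a ng : Int)
    (h : ∀ g, a ≤ g → g < ng → interleavedOffset r g nko (32*4*4) ≠ flat) :
    locAInner flat nko r (PySem.List.pyRange a ng 1) = none := by
  by_cases hab : ng ≤ a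
  · rw [PySem.List.pyRange_one_eq_nil hab]; rfl
  · push_neg at hab
    rw [PySem.List.pyRange_one_cons hab]
    have : locAInner flat nko r (a :: PySem.List.pyRange (a+1) ng 1) =
        if interleavedOffset r a nko (32*4*4) = flat then some (r, a)
        else locAInner flat nko r (PySem.List.pyRange (a+1) ng 1) := rfl
    rw [this, if_neg (h a le_rfl hab)]
    exact inner_none flat nko r (a+1) ng (fun g h1 h2 => h g (by omega) h2)
termination_by (ng - a).toNat
decreasing_by omega

-- inner loop: first match
theorem inner_some (flat nko r : Int) (a ng g : Int) (h1 : a ≤ g) (h2 : g < ng)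
    (hm : interleavedOffset r g nko (32*4*4) = flat)
    (hmin : ∀ g', a ≤ g' → g' < g → interleavedOffset r g' nko (32*4*4) ≠ flat) :
    locAInner flat nko r (PySem.List.pyRange a ng 1) = some (r, g) := by
  rw [PySem.List.pyRange_one_cons (by omega)]
  have hstep : locAInner flat nko r (a :: PySem.List.pyRange (a+1) ng 1) =
      if interleavedOffset r a nko (32*4*4) = flat then some (r, a)
      else locAInner flat nko r (PySem.List.pyRange (a+1) ng 1) := rfl
  rw [hstep]
  by_cases hag : a = g
  · subst hag; rw [if_pos hm]
  · rw [if_neg (hmin a le_rfl (by omega))]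
    exact inner_some flat nko r (a+1) ng g (by omega) h2 hm (fun g' h3 h4 => hmin g' (by omega) h4)
termination_by (g - a).toNat
decreasing_by omega

-- outer loop: no row matches on [a, pr)
theorem outer_none (flat nko ng : Int) (a pr : Int)
    (h : ∀ r g, a ≤ r → r < pr → 0 ≤ g → g < ng → interleavedOffset r g nko (32*4*4) ≠ flat) :
    locAOuter flat nko ng (PySem.List.pyRange a pr 1) = none := by
  by_cases hab : pr ≤ a
  · rw [PySem.List.pyRange_one_eq_nil hab]; rfl
  · push_neg at hab
    rw [PySem.List.pyRange_one_cons hab]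
    have hstep : locAOuter flat nko ng (a :: PySem.List.pyRange (a+1) pr 1) =
        match locAInner flat nko a (PySem.List.pyRange 0 ng 1) with
        | some p => some p
        | none => locAOuter flat nko ng (PySem.List.pyRange (a+1) pr 1) := rfl
    rw [hstep, inner_none flat nko a 0 ng (fun g h1 h2 => h a g le_rfl hab h1 h2)]
    exact outer_none flat nko ng (a+1) pr (fun r g h1 h2 h3 h4 => h r g (by omega) h2 h3 h4)
termination_by (pr - a).toNat
decreasing_by omega

-- outer loop: first matching row r, with its first matching group g
theorem outer_some (flat nko ng : Int) (a pr r g : Int) (h1 : a ≤ r) (h2 : r < pr)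
    (hg1 : 0 ≤ g) (hg2 : g < ng)
    (hm : interleavedOffset r g nko (32*4*4) = flat)
    (hgmin : ∀ g', 0 ≤ g' → g' < g → interleavedOffset r g' nko (32*4*4) ≠ flat)
    (hrmin : ∀ r' g', a ≤ r' → r' < r → 0 ≤ g' → g' < ng →
        interleavedOffset r' g' nko (32*4*4) ≠ flat) :
    locAOuter flat nko ng (PySem.List.pyRange a pr 1) = some (r, g) := by
  rw [PySem.List.pyRange_one_cons (by omega)]
  have hstep : locAOuter flat nko ng (a :: PySem.List.pyRange (a+1) pr 1) =
      match locAInner flat nko a (PySem.List.pyRange 0 ng 1) with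
      | some p => some p
      | none => locAOuter flat nko ng (PySem.List.pyRange (a+1) pr 1) := rfl
  rw [hstep]
  by_cases har : a = r
  · subst har
    rw [inner_some flat nko a 0 ng g hg1 hg2 hm hgmin]
  · rw [inner_none flat nko a 0 ng (fun g' hga hgb => hrmin a g' le_rfl (by omega) hga hgb)]
    exact outer_some flat nko ng (a+1) pr r g (by omega) h2 hg1 hg2 hm hgmin
      (fun r' g' h3 h4 h5 h6 => hrmin r' g' (by omega) h4 h5 h6)
termination_by (r - a).toNat
decreasing_by omega

-- minimality of B's row block: any block rb' admitting a group height ≤ gmax is ≥ rb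
theorem rb_minimal (q gmax nko : Int) (hnko : 0 < nko) (rb' : Int) (h0 : 0 ≤ rb')
    (hle : q - rb' * nko ≤ gmax) :
    max 0 (-((gmax - q) / nko)) ≤ rb' := by
  have hd := Int.ediv_add_emod (gmax - q) nko
  have hm1 := Int.emod_nonneg (gmax - q) (by omega : nko ≠ 0)
  have hm2 := Int.emod_lt_of_pos (gmax - q) hnko
  set t := (gmax - q) / nko with ht
  set s := (gmax - q) % nko with hs
  rcases le_or_gt (-t) 0 with hc | hc
  · rw [max_eq_left hc]; exact h0
  · rw [max_eq_right hc.le]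
    by_contra hcon
    push_neg at hcon
    have h1 : rb' ≤ -t - 1 := by omega
    have h2 : rb' * nko ≤ (-t - 1) * nko := mul_le_mul_of_nonneg_right h1 (by omega)
    have h3 : (-t - 1) * nko = -(nko * t) - nko := by ring
    linarith

-- low-bit field extraction for a reassembled row index
theorem row_fields (RB R2 R5 : Int) (h1 : 0 ≤ RB) (h2 : 0 ≤ R2) (h3 : R2 ≤ 3) (h4 : 0 ≤ R5) (h5 : R5 ≤ 31) :
    (128*RB + 32*R2 + R5) % 32 = R5 ∧ (128*RB + 32*R2 + R5) % 128 / 32 = R2 := by omega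

-- the central theorem: A's nested scan equals B's closed-form inversion
theorem A_eq_B (flat rows hidden : Int) :
    locate_scale_mismatch flat rows hidden = locate_scale_mismatch_alt flat rows hidden := by
  have e128 : ∀ a : Int, PySem.Int.floordiv a 128 = a / 128 :=
    fun a => PySem.Int.floordiv_eq_ediv_of_pos (by norm_num)
  have e16 : ∀ a : Int, PySem.Int.floordiv a 16 = a / 16 :=
    fun a => PySem.Int.floordiv_eq_ediv_of_pos (by norm_num)
  have e4 : ∀ a : Int, PySem.Int.floordiv a 4 = a / 4 :=
    fun a => PySem.Int.floordiv_eq_ediv_of_pos (by norm_num)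
  have e512 : ∀ a : Int, PySem.Int.floordiv a 512 = a / 512 :=
    fun a => PySem.Int.floordiv_eq_ediv_of_pos (by norm_num)
  have m512 : ∀ a : Int, PySem.Int.mod a 512 = a % 512 :=
    fun a => PySem.Int.mod_eq_emod_of_pos (by norm_num)
  have m4 : ∀ a : Int, PySem.Int.mod a 4 = a % 4 :=
    fun a => PySem.Int.mod_eq_emod_of_pos (by norm_num)
  simp only [locate_scale_mismatch, locate_scale_mismatch_alt, e128, e16, e4, e512, m512, m4]
  set NG := hidden / 16 with hNG
  set NKO := NG / 4 with hNKO
  set PR := (rows + 127) / 128 * 128 with hPRd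
  set NB := PR / 128 with hNB
  set Q := flat / 512 with hQ
  set L := flat % 512 with hL
  set R5 := L / 16 with hR5
  set R2 := L / 4 % 4 with hR2
  set G3 := L % 4 with hG3
  set GM := (NG - 1 - G3) / 4 with hGM
  have hPRNB : PR = 128 * NB := by omega
  have hmatch : ∀ r g : Int, 0 ≤ r → 0 ≤ g →
      (interleavedOffset r g NKO (32*4*4) = flat ↔
        (r / 128 * NKO + g / 4 = Q ∧ r % 32 = R5 ∧ r % 128 / 32 = R2 ∧ g % 4 = G3)) := by
    intro r g hr hg
    rw [hR5, hR2, hG3, hL, hQ]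
    exact offset_match r g NKO flat hr hg
  split_ifs with h1 h2 h3 h4 h5
  -- case I: no groups or no row blocks
  · exact outer_none flat NKO NG 0 PR (by
      intro r g hr hrp hg hgn
      exfalso; omega)
  -- case II: no group index is compatible with the low bits
  · exact outer_none flat NKO NG 0 PR (by
      intro r g hr hrp hg hgn hoff
      rw [hmatch r g hr hg] at hoff
      exfalso
      have hg4 := hoff.2.2.2
      omega)
  -- case III-a: num_k_outer = 0, hit
  · have h4' : 0 ≤ Q ∧ Q ≤ GM ∧ (0:Int) < NB := h4
    have hb : 0 ≤ R2 ∧ R2 ≤ 3 ∧ 0 ≤ R5 ∧ R5 ≤ 31 ∧ 0 ≤ G3 ∧ G3 ≤ 3 ∧ 0 ≤ L ∧ L < 512 := by omega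
    show locAOuter flat NKO NG (PySem.List.pyRange 0 PR 1) = some (128*0 + 32*R2 + R5, 4*Q + G3)
    refine outer_some flat NKO NG 0 PR (128*0 + 32*R2 + R5) (4*Q + G3)
      (by omega) (by omega) (by omega) (by omega) ?_ ?_ ?_
    · rw [hmatch _ _ (by omega) (by omega), h3]
      have hrf := row_fields 0 R2 R5 (by omega) (by omega) (by omega) (by omega) (by omega)
      refine ⟨by omega, hrf.1, hrf.2, by omega⟩
    · intro g' hg0 hlt hoff
      rw [hmatch _ _ (by omega) hg0, h3] at hoff
      omega
    · intro r' g' h0r h1r hg0 hgn hoff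
      rw [hmatch _ _ (by omega) hg0] at hoff
      omega
  -- case III-b: num_k_outer = 0, miss
  · have h4' : ¬(0 ≤ Q ∧ Q ≤ GM ∧ (0:Int) < NB) := h4
    exact outer_none flat NKO NG 0 PR (by
      intro r g hr hrp hg hgn hoff
      rw [hmatch r g hr hg, h3] at hoff
      exfalso
      omega)
  -- cases IV: num_k_outer ≥ 1
  · have hNKOpos : 0 < NKO := by omega
    rw [PySem.Int.floordiv_eq_ediv_of_pos hNKOpos] at h5 ⊢
    set T := (GM - Q) / NKO with hT
    set RB := max 0 (-T) with hRB
    set GH := Q - RB * NKO with hGH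
    have h5' : 0 ≤ GH ∧ GH ≤ GM ∧ RB < NB := h5
    have hRB0 : 0 ≤ RB := le_max_left _ _
    have hrded : (128*RB + 32*R2 + R5) / 128 = RB := by omega
    have hb : 0 ≤ R2 ∧ R2 ≤ 3 ∧ 0 ≤ R5 ∧ R5 ≤ 31 ∧ 0 ≤ G3 ∧ G3 ≤ 3 ∧ 0 ≤ L ∧ L < 512 := by omega
    show locAOuter flat NKO NG (PySem.List.pyRange 0 PR 1) =
      some (128*RB + 32*R2 + R5, 4*GH + G3)
    refine outer_some flat NKO NG 0 PR (128*RB + 32*R2 + R5) (4*GH + G3)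
      (by omega) (by omega) (by omega) (by omega) ?_ ?_ ?_
    · rw [hmatch _ _ (by omega) (by omega)]
      have hrf := row_fields RB R2 R5 (by omega) (by omega) (by omega) (by omega) (by omega)
      refine ⟨?_, hrf.1, hrf.2, by omega⟩
      have hgd : (4*GH + G3) / 4 = GH := by omega
      rw [hrded, hgd, hGH]; ring
    · intro g' hg0 hlt hoff
      rw [hmatch _ _ (by omega) hg0] at hoff
      obtain ⟨hc1, hc2, hc3, hc4⟩ := hoff
      rw [hrded] at hc1
      have hgd : g' / 4 = GH := by rw [hGH]; linarith
      omega
    · intro r' g' h0r h1r hg0 hgn hoff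
      rw [hmatch _ _ (by omega) hg0] at hoff
      obtain ⟨hc1, hc2, hc3, hc4⟩ := hoff
      have hgle : g' / 4 ≤ GM := by omega
      have hmin := rb_minimal Q GM NKO hNKOpos (r'/128) (by omega) (by linarith)
      rw [← hT, ← hRB] at hmin
      omega
  · have hNKOpos : 0 < NKO := by omega
    rw [PySem.Int.floordiv_eq_ediv_of_pos hNKOpos] at h5
    set T := (GM - Q) / NKO with hT
    set RB := max 0 (-T) with hRB
    set GH := Q - RB * NKO with hGH
    have h5' : ¬(0 ≤ GH ∧ GH ≤ GM ∧ RB < NB) := h5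
    have hRB0 : 0 ≤ RB := le_max_left _ _
    have hd : NKO * T + (GM - Q) % NKO = GM - Q := by rw [hT]; exact Int.ediv_add_emod _ _
    have hs1 : 0 ≤ (GM - Q) % NKO := Int.emod_nonneg _ (by omega)
    have hs2 : (GM - Q) % NKO < NKO := Int.emod_lt_of_pos _ hNKOpos
    exact outer_none flat NKO NG 0 PR (by
      intro r g hr hrp hg hgn hoff
      rw [hmatch r g hr hg] at hoff
      obtain ⟨hc1, hc2, hc3, hc4⟩ := hoff
      exfalso
      have hgle : g / 4 ≤ GM := by omega
      have hmin := rb_minimal Q GM NKO hNKOpos (r/128) (by omega) (by linarith)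
      rw [← hT, ← hRB] at hmin
      have hmul : RB * NKO ≤ (r/128) * NKO := mul_le_mul_of_nonneg_right hmin (by omega)
      have hg40 : 0 ≤ g / 4 := by omega
      have hGH0 : 0 ≤ GH := by rw [hGH]; linarith
      have hGHle : GH ≤ GM := by
        rcases le_or_gt (-T) 0 with hx | hx
        · have hRBz : RB = 0 := by rw [hRB, max_eq_left hx]
          have hz : RB * NKO = 0 := by rw [hRBz]; ring
          have hTnn : 0 ≤ T := by omega
          have hTmul : 0 ≤ NKO * T := mul_nonneg (by omega) hTnn
          rw [hGH]; linarith
        · have hRBt : RB = -T := by rw [hRB, max_eq_right hx.le]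
          have hz : RB * NKO = -(NKO * T) := by rw [hRBt]; ring
          rw [hGH]; linarith
      have hRBlt : RB < NB := by omega
      exact h5' ⟨hGH0, hGHle, hRBlt⟩)

-- ===== VERDICT (by name: the statement is the Claim_ definition above) =====
theorem locate_scale_mismatch_spec : Claim_equal_locate_scale_mismatch := by
  intro flat rows hidden _
  show locate_scale_mismatch flat rows hidden = locate_scale_mismatch_alt flat rows hidden
  exact A_eq_B flat rows hidden
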